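-- pv_equiv track=rewrite | github.com/duozokker/agent2 | shared/runtime.py | _normalize_model_id
-- ===== SOURCE A (Python) =====
-- _PROVIDER_PREFIXES = ("openrouter", "openai", "anthropic", "google-gla", "groq", "mistral")
--
-- def _normalize_model_id(model_id: str) -> str:
--     """Convert ``provider/org/model`` to ``provider:org/model``.
--
--     PydanticAI uses a colon to separate the provider from the model name,
--     but the project config files use a slash for readability.  This function
--     bridges the two conventions.
--
--     Examples::
--
--         openrouter/anthropic/claude-sonnet-4  ->  openrouter:anthropic/claude-sonnet-4
--         openai:gpt-4o                         ->  openai:gpt-4o  (already correct)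
--         test                                  ->  test           (no change)
--     """
--     if ":" in model_id:
--         # Already in PydanticAI format
--         return model_id
--
--     for prefix in _PROVIDER_PREFIXES:
--         slash_prefix = prefix + "/"
--         if model_id.startswith(slash_prefix):
--             return prefix + ":" + model_id[len(slash_prefix):]
--
--     return model_id
-- ===== SOURCE B (Python) =====
-- _PROVIDER_PREFIXES = ("openrouter", "openai", "anthropic", "google-gla", "groq", "mistral")
--
--
-- def _build_trie():
--     root = {}
--     for prefix in _PROVIDER_PREFIXES:
--         node = root
--         for ch in prefix:
--             node = node.setdefault(ch, {})
--         node[""] = True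
--     return root
--
--
-- _TRIE = _build_trie()
--
--
-- def _normalize_model_id(model_id: str) -> str:
--     # Single left-to-right scan: walk a character trie of the provider names;
--     # the first '/' reached at an accepting trie node marks the rewrite point,
--     # while the same pass keeps looking for a ':' (which means "leave unchanged").
--     node = _TRIE
--     split = -1
--     for i, ch in enumerate(model_id):
--         if ch == ":":
--             return model_id
--         if ch == "/" and node is not None and "" in node:
--             split = i
--             node = None
--         elif node is not None:
--             node = node.get(ch)
--     if split == -1:
--         return model_id
--     return model_id[:split] + ":" + model_id[split + 1:]
-- ===== Notes on version B (the rewrite author's own statement) =====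
-- stated objective: alternative
-- what changed: B replaces A's per-prefix startswith scan by a single left-to-right pass of the string that walks a character trie of the provider names, recording the rewrite point at the first slash reached in an accepting trie node while the same pass watches for a colon.
import Mathlib
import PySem

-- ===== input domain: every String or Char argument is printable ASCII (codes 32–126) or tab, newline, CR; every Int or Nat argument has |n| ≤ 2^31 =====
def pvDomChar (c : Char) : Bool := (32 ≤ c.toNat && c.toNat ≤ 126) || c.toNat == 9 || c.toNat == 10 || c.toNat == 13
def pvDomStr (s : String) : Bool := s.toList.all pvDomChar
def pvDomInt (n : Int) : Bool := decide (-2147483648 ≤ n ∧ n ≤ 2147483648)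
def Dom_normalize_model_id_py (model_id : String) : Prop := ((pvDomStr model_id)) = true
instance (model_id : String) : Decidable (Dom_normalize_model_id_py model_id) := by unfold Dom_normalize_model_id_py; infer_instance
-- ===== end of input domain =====

-- B replaces A's per-prefix startswith scan by one left-to-right pass walking a character trie of the provider names (objective: alternative).

-- ===== PORT A =====
-- the module constant _PROVIDER_PREFIXES (a tuple, scanned in order by A)
def pvPrefixes : List (List Char) :=
  ["openrouter".toList, "openai".toList, "anthropic".toList,
   "google-gla".toList, "groq".toList, "mistral".toList]

-- A's for-loop: for prefix in _PROVIDER_PREFIXES: if model_id.startswith(prefix + "/"): return prefix + ":" + model_id[len(prefix+"/"):]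
-- model_id[len(slash_prefix):] with a nonnegative literal index is exactly List.drop of that length.
def pvALoop : List (List Char) → List Char → List Char
  | [], s => s
  | p :: ps, s =>
      if (p ++ ['/']).isPrefixOf s then p ++ ':' :: s.drop (p.length + 1)
      else pvALoop ps s

def normalize_model_id_py (model_id : String) : String :=
  if ':' ∈ model_id.toList then model_id
  else String.ofList (pvALoop pvPrefixes model_id.toList)

-- ===== PORT B =====
-- B's trie node is represented by the set of remaining suffixes of the provider
-- names whose walked part matches: '""' in the Python dict node ↔ [] ∈ the suffix
-- list, node.get(ch) ↔ pvChildren (None ↔ the empty list — a Python trie node dict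
-- is never empty, so the absent-key case is exactly the empty child set).
def pvBTrie : List (List Char) := pvPrefixes

def pvChildren (nd : List (List Char)) (c : Char) : List (List Char) :=
  nd.filterMap fun t => match t with
    | [] => none
    | d :: r => if d = c then some r else none

-- B's for-loop over enumerate(model_id): early return on ':' is 'none' (unchanged),
-- split = -1 is 'none', split = i is 'some i'.
def pvBScan : List Char → Nat → List (List Char) → Option Nat → Option Nat
  | [], _, _, split => split
  | c :: cs, i, nd, split =>
      if c = ':' then none
      else if c = '/' ∧ [] ∈ nd then pvBScan cs (i + 1) [] (some i)
      else pvBScan cs (i + 1) (pvChildren nd c) split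

def normalize_model_id_py_alt (model_id : String) : String :=
  match pvBScan model_id.toList 0 pvBTrie none with
  | none => model_id
  | some i => String.ofList (model_id.toList.take i ++ ':' :: model_id.toList.drop (i + 1))

-- ===== PRECONDITION & SPEC =====
def Spec_normalize_model_id_py (model_id : String) (out : String) : Prop := out = normalize_model_id_py_alt model_id
instance (model_id : String) (out : String) : Decidable (Spec_normalize_model_id_py model_id out) := by unfold Spec_normalize_model_id_py; infer_instance

-- ===== CLAIM =====
def Claim_equal_normalize_model_id_py : Prop := ∀ (model_id : String), Dom_normalize_model_id_py model_id → Spec_normalize_model_id_py model_id (normalize_model_id_py model_id)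

-- ===== LEMMAS AND PROOFS =====

-- membership in a trie child node
theorem pv_mem_children (nd : List (List Char)) (c : Char) (t : List Char) :
    t ∈ pvChildren nd c ↔ c :: t ∈ nd := by
  simp only [pvChildren, List.mem_filterMap]
  constructor
  · rintro ⟨x, hx, he⟩
    match x with
    | [] => simp at he
    | d :: r =>
        by_cases hd : d = c
        · simp [hd] at he; subst hd; rw [he] at hx; exact hx
        · simp [hd] at he
  · intro h
    exact ⟨c :: t, h, by simp⟩

-- walking the trie along h collects exactly the suffixes after h
theorem pv_mem_walk (h : List Char) : ∀ (nd : List (List Char)) (t : List Char),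
    t ∈ h.foldl pvChildren nd ↔ h ++ t ∈ nd := by
  induction h with
  | nil => intro nd t; simp
  | cons a h ih =>
      intro nd t
      simp only [List.foldl_cons, List.cons_append]
      rw [ih, pv_mem_children]

-- an early ':' makes the scan return 'unchanged'
theorem pv_bscan_colon (cs : List Char) : ∀ (i : Nat) (nd : List (List Char)) (split : Option Nat),
    ':' ∈ cs → pvBScan cs i nd split = none := by
  induction cs with
  | nil => intro _ _ _ h; simp at h
  | cons c cs ih =>
      intro i nd split h
      by_cases hc : c = ':'
      · simp [pvBScan, hc]
      · have hm : ':' ∈ cs := by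
          rcases List.mem_cons.mp h with h | h
          · exact absurd h.symm hc
          · exact h
        by_cases hb : c = '/' ∧ [] ∈ nd
        · simp [pvBScan, hb, ih _ _ _ hm]
        · simp [pvBScan, hc, hb, ih _ _ _ hm]

-- with no ':' and no '/', the scan just returns the split accumulator
theorem pv_bscan_plain (cs : List Char) : ∀ (i : Nat) (nd : List (List Char)) (split : Option Nat),
    ':' ∉ cs → '/' ∉ cs → pvBScan cs i nd split = split := by
  induction cs with
  | nil => intro _ _ _ _ _; rfl
  | cons c cs ih =>
      intro i nd split hcol hsl
      have hc : ¬ c = ':' := fun e => hcol (e ▸ List.mem_cons_self)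
      have hs : ¬ c = '/' := fun e => hsl (e ▸ List.mem_cons_self)
      have hcol' : ':' ∉ cs := fun h => hcol (List.mem_cons_of_mem c h)
      have hsl' : '/' ∉ cs := fun h => hsl (List.mem_cons_of_mem c h)
      simp [pvBScan, hc, hs, ih _ _ _ hcol' hsl']

-- a dead node ([] ↔ Python's None) never changes the split; only ':' matters
theorem pv_bscan_dead (cs : List Char) : ∀ (i : Nat) (split : Option Nat),
    ':' ∉ cs → pvBScan cs i [] split = split := by
  induction cs with
  | nil => intro _ _ _; rfl
  | cons c cs ih =>
      intro i split hcol
      have hc : ¬ c = ':' := fun e => hcol (e ▸ List.mem_cons_self)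
      have hcol' : ':' ∉ cs := fun h => hcol (List.mem_cons_of_mem c h)
      have hch : pvChildren [] c = [] := rfl
      simp [pvBScan, hc, ih _ _ hcol', hch]

-- main characterisation: on h ++ '/' :: rest with no ':' anywhere and no '/' in h,
-- the scan splits exactly when the walk along h reaches an accepting node
theorem pv_bscan_slash (h : List Char) : ∀ (rest : List Char) (i : Nat) (nd : List (List Char)),
    ':' ∉ h → ':' ∉ rest → '/' ∉ h → (∀ t ∈ nd, '/' ∉ t) →
    pvBScan (h ++ '/' :: rest) i nd none =
      if [] ∈ h.foldl pvChildren nd then some (i + h.length) else none := by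
  induction h with
  | nil =>
      intro rest i nd _ hrest _ hnd
      by_cases hacc : [] ∈ nd
      · simp [pvBScan, hacc, pv_bscan_dead rest _ _ hrest]
      · have hch : pvChildren nd '/' = [] := by
          rw [List.eq_nil_iff_forall_not_mem]
          intro t ht
          exact (hnd _ ((pv_mem_children nd '/' t).mp ht)) List.mem_cons_self
        simp [pvBScan, hacc, hch, pv_bscan_dead rest _ _ hrest]
  | cons a h ih =>
      intro rest i nd hcol hrest hsl hnd
      have ha : ¬ a = ':' := fun e => hcol (e ▸ List.mem_cons_self)
      have has : ¬ a = '/' := fun e => hsl (e ▸ List.mem_cons_self)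
      have hcol' : ':' ∉ h := fun x => hcol (List.mem_cons_of_mem a x)
      have hsl' : '/' ∉ h := fun x => hsl (List.mem_cons_of_mem a x)
      have hnd' : ∀ t ∈ pvChildren nd a, '/' ∉ t := by
        intro t ht hm
        exact hnd _ ((pv_mem_children nd a t).mp ht) (List.mem_cons_of_mem a hm)
      have := ih rest (i + 1) (pvChildren nd a) hcol' hrest hsl' hnd'
      simp only [List.cons_append, pvBScan, ha, has, if_false, false_and, this,
        List.foldl_cons, List.length_cons]
      have : i + 1 + h.length = i + (h.length + 1) := by omega
      rw [this]

-- two slash-free blocks followed by '/' agree iff the whole lists agree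
theorem pv_eq_of_append_slash (p : List Char) (w : List Char) :
    ∀ (h r : List Char), '/' ∉ p → '/' ∉ h → p ++ '/' :: w = h ++ '/' :: r → p = h := by
  induction p with
  | nil =>
      intro h r _ hh e
      cases h with
      | nil => rfl
      | cons b u =>
          simp only [List.nil_append, List.cons_append, List.cons.injEq] at e
          exact absurd (e.1 ▸ List.mem_cons_self) hh
  | cons a t ih =>
      intro h r hp hh e
      cases h with
      | nil =>
          simp only [List.cons_append, List.nil_append, List.cons.injEq] at e
          exact absurd (e.1 ▸ List.mem_cons_self) hp
      | cons b u =>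
          simp only [List.cons_append, List.cons.injEq] at e
          have := ih u r (fun hm => hp (List.mem_cons_of_mem a hm))
            (fun hm => hh (List.mem_cons_of_mem b hm)) e.2
          rw [e.1, this]

theorem pv_prefix_slash_iff (p h r : List Char) (hp : '/' ∉ p) (hh : '/' ∉ h) :
    (p ++ ['/']) <+: (h ++ '/' :: r) ↔ p = h := by
  constructor
  · rintro ⟨w, hw⟩
    apply pv_eq_of_append_slash p w h r hp hh
    simpa using hw
  · rintro rfl
    exact ⟨r, by simp⟩

theorem pv_aLoop_no_slash (ps : List (List Char)) (s : List Char) (hs : '/' ∉ s) :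
    pvALoop ps s = s := by
  induction ps with
  | nil => rfl
  | cons p ps ih =>
      have : ¬ (p ++ ['/']).isPrefixOf s := by
        intro hpre
        have hsub : (p ++ ['/']) <+: s := List.isPrefixOf_iff_prefix.mp hpre
        exact hs (hsub.subset (by simp))
      simp [pvALoop, this, ih]

theorem pv_aLoop_slash (ps : List (List Char)) (h r : List Char)
    (hps : ∀ p ∈ ps, '/' ∉ p) (hh : '/' ∉ h) :
    pvALoop ps (h ++ '/' :: r) = if h ∈ ps then h ++ ':' :: r else h ++ '/' :: r := by
  induction ps with
  | nil => simp [pvALoop]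
  | cons p ps ih =>
      have hp : '/' ∉ p := hps p List.mem_cons_self
      have hps' : ∀ q ∈ ps, '/' ∉ q := fun q hq => hps q (List.mem_cons_of_mem p hq)
      by_cases hph : p = h
      · subst hph
        have hpre : (p ++ ['/']).isPrefixOf (p ++ '/' :: r) :=
          List.isPrefixOf_iff_prefix.mpr ((pv_prefix_slash_iff p p r hp hp).mpr rfl)
        have hdrop : (p ++ '/' :: r).drop (p.length + 1) = r := by
          have h1 : p ++ '/' :: r = (p ++ ['/']) ++ r := by simp
          have h2 : (p ++ ['/']).length = p.length + 1 := by simp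
          rw [h1, ← h2, List.drop_left]
        simp [pvALoop, hpre, hdrop]
      · have hnpre : ¬ (p ++ ['/']).isPrefixOf (h ++ '/' :: r) := by
          intro hpre
          exact hph ((pv_prefix_slash_iff p h r hp hh).mp (List.isPrefixOf_iff_prefix.mp hpre))
        have hmem : h ∈ p :: ps ↔ h ∈ ps := by
          constructor
          · intro hx
            rcases List.mem_cons.mp hx with hx | hx
            · exact absurd hx.symm hph
            · exact hx
          · exact List.mem_cons_of_mem p
        simp [pvALoop, hnpre, ih hps', hmem]

theorem pv_dropWhile_head (l : List Char) (c : Char) (r : List Char)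
    (e : l.dropWhile (· ≠ '/') = c :: r) : c = '/' := by
  induction l with
  | nil => simp at e
  | cons a t ih =>
      rw [List.dropWhile_cons] at e
      by_cases ha : a = '/'
      · simp [ha] at e
        exact e.1.symm
      · simp [ha] at e
        exact ih (by simpa using e)

-- ===== VERDICT =====
theorem normalize_model_id_py_spec : Claim_equal_normalize_model_id_py := by
  intro model_id _
  unfold Spec_normalize_model_id_py normalize_model_id_py normalize_model_id_py_alt
  by_cases hc : ':' ∈ model_id.toList
  · rw [if_pos hc, pv_bscan_colon _ _ _ _ hc]
  · rw [if_neg hc]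
    have hh : '/' ∉ model_id.toList.takeWhile (· ≠ '/') := by
      intro hm
      have := List.mem_takeWhile_imp hm
      simp at this
    have hps : ∀ p ∈ pvPrefixes, '/' ∉ p := by decide
    cases ht : model_id.toList.dropWhile (· ≠ '/') with
    | nil =>
        have hsplit : model_id.toList.takeWhile (· ≠ '/') = model_id.toList := by
          have := List.takeWhile_append_dropWhile (p := fun x => decide (x ≠ '/')) (l := model_id.toList)
          rw [ht] at this
          simpa using this
        have hns : '/' ∉ model_id.toList := hsplit ▸ hh
        rw [pv_bscan_plain _ _ _ _ hc hns, pv_aLoop_no_slash pvPrefixes _ hns,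
          String.ofList_toList]
    | cons c rest =>
        have hc' : c = '/' := pv_dropWhile_head model_id.toList c rest ht
        set h := model_id.toList.takeWhile (· ≠ '/') with hhdef
        have hseq : model_id.toList = h ++ '/' :: rest := by
          conv_lhs => rw [← List.takeWhile_append_dropWhile (p := fun x => decide (x ≠ '/')) (l := model_id.toList)]
          rw [ht, hc']
        have hcolh : ':' ∉ h := fun hx => hc (hseq ▸ List.mem_append_left _ hx)
        have hcolr : ':' ∉ rest := fun hx =>
          hc (hseq ▸ List.mem_append_right _ (List.mem_cons_of_mem _ hx))
        have hndslash : ∀ t ∈ pvBTrie, '/' ∉ t := hps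
        have hB : pvBScan model_id.toList 0 pvBTrie none =
            if [] ∈ h.foldl pvChildren pvBTrie then some h.length else none := by
          rw [hseq, pv_bscan_slash h rest 0 pvBTrie hcolh hcolr hh hndslash]
          simp
        have hwalk : ([] ∈ h.foldl pvChildren pvBTrie) ↔ h ∈ pvPrefixes := by
          rw [pv_mem_walk h pvBTrie []]
          simp [pvBTrie]
        have hA : pvALoop pvPrefixes model_id.toList =
            if h ∈ pvPrefixes then h ++ ':' :: rest else model_id.toList := by
          conv_lhs => rw [hseq]
          rw [pv_aLoop_slash pvPrefixes h rest hps hh, ← hseq]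
        by_cases hm : h ∈ pvPrefixes
        · rw [hA, if_pos hm, hB, if_pos (hwalk.mpr hm)]
          have htake : model_id.toList.take h.length = h := by
            rw [hseq, List.take_left]
          have hdrop : model_id.toList.drop (h.length + 1) = rest := by
            have h1 : model_id.toList = (h ++ ['/']) ++ rest := by rw [hseq]; simp
            have h2 : (h ++ ['/']).length = h.length + 1 := by simp
            rw [h1, ← h2, List.drop_left]
          simp [htake, hdrop]
        · rw [hA, if_neg hm, hB, if_neg (fun x => hm (hwalk.mp x)), String.ofList_toList]
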